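-- pv_equiv track=rewrite | github.com/YUYUJIN/codingStudy | backjoon/2775.py | countPeoples
-- ===== SOURCE A (Python) =====
-- def countPeoples(k,n):
--     house=[[i+1 for i in range(n)]]
--     for i in range(k):
--         peoples=[house[i][0]]
--         for j in range(1,n):
--             peoples.append(peoples[j-1]+house[i][j])
--         house.append(peoples)
--     return house[k][n-1]
-- ===== SOURCE B (Python) =====
-- def countPeoples(k, n):
--     # closed form: the answer is the binomial coefficient C(n+k, k+1),
--     # computed by the exact multiplicative formula in O(k) time.
--     r = 1
--     for t in range(1, k + 2):
--         r = r * (n - 1 + t) // t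
--     return r
-- ===== Notes on version B (the rewrite author's own statement) =====
-- stated objective: faster
-- what changed: Replaces the O(k*n) prefix-sum DP table with the closed-form binomial coefficient C(n+k, k+1) computed by the O(k) multiplicative formula.
-- outside the precondition, e.g. on countPeoples(-1, 3): A returns 3, B returns 1; on countPeoples(0, 0): A raises IndexError, B returns 0
import Mathlib
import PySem

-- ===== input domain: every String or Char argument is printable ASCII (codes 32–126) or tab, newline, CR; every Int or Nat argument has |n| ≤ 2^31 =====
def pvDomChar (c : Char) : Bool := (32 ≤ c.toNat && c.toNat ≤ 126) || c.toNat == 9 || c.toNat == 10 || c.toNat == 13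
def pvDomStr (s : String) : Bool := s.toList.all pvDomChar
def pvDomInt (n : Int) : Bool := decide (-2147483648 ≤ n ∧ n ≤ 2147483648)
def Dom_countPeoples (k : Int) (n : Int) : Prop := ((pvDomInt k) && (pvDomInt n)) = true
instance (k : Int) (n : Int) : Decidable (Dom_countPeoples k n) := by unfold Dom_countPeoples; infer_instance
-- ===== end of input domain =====

-- B replaces A's O(k*n) prefix-sum DP table by the closed-form binomial C(n+k, k+1)
-- computed with the O(k) multiplicative formula (objective: faster).

-- ===== PORT A =====
-- literal transliteration of A; an out-of-range index (Python IndexError) yields the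
-- Option default via .getD — those inputs are excluded by Pre_countPeoples
def countPeoples (k : Int) (n : Int) : Int :=
  let house : List (List Int) := [(PySem.List.pyRange 0 n 1).map (fun i => i + 1)]
  let house := (PySem.List.pyRange 0 k 1).foldl (fun house i =>
    let row := (PySem.List.pyGet? house i).getD []
    let peoples : List Int := [(PySem.List.pyGet? row 0).getD 0]
    let peoples := (PySem.List.pyRange 1 n 1).foldl (fun peoples j =>
      peoples ++ [(PySem.List.pyGet? peoples (j - 1)).getD 0 + (PySem.List.pyGet? row j).getD 0]) peoples
    house ++ [peoples]) house
  ((PySem.List.pyGet? house k).bind (fun r => PySem.List.pyGet? r (n - 1))).getD 0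

-- ===== PORT B =====
def countPeoples_alt (k : Int) (n : Int) : Int :=
  (PySem.List.pyRange 1 (k + 2) 1).foldl (fun r t => PySem.Int.floordiv (r * (n - 1 + t)) t) 1

-- ===== PRECONDITION & SPEC =====
-- Pre_ excludes n ≤ 0 and k ≤ -2, where A raises IndexError, and the line k = -1 (n ≥ 1),
-- where A's negative-index wraparound accidentally reads floor 0 back and returns n —
-- an artefact of Python list indexing that B's closed form does not reproduce.
def Pre_countPeoples (k : Int) (n : Int) : Prop := 0 ≤ k ∧ 1 ≤ n
instance (k : Int) (n : Int) : Decidable (Pre_countPeoples k n) := by unfold Pre_countPeoples; infer_instance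
def pvWitness_countPeoples : Int × Int := (3, 4)

def Spec_countPeoples (k : Int) (n : Int) (out : Int) : Prop := out = countPeoples_alt k n
instance (k : Int) (n : Int) (out : Int) : Decidable (Spec_countPeoples k n out) := by unfold Spec_countPeoples; infer_instance

-- ===== CLAIM (what is proved, stated in full; the proofs are below) =====
def Claim_equal_countPeoples : Prop := ∀ (k : Int) (n : Int), Dom_countPeoples k n → Pre_countPeoples k n → Spec_countPeoples k n (countPeoples k n)

-- ===== LEMMAS AND PROOFS =====

-- row i of A's table: entry j is the binomial C(i+j+1, i+1)
def rowOf (i N : Nat) : List Int :=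
  (List.range N).map (fun j => ((i + j + 1).choose (i + 1) : Int))

lemma rowOf_get (i N j : Nat) (h : j < N) :
    (rowOf i N)[j]? = some (((i + j + 1).choose (i + 1) : Int)) := by
  simp [rowOf, h]

lemma rowOf_get_zero (i N : Nat) (hN : 1 ≤ N) :
    PySem.List.pyGet? (rowOf i N) 0 = some (((i + 1).choose (i + 1) : Int)) := by
  rw [show (0 : Int) = ((0 : Nat) : Int) by norm_num, PySem.List.pyGet?_natCast]
  simpa using rowOf_get i N 0 hN

-- A's inner prefix-sum fold builds the next row (Pascal's rule)
lemma inner_fold (i N : Nat) (hN : 1 ≤ N) (m : Nat) (h1 : 1 ≤ m) (hm : m ≤ N) :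
    (PySem.List.pyRange 1 (m : Int) 1).foldl
      (fun ps j => ps ++ [(PySem.List.pyGet? ps (j - 1)).getD 0 +
                          (PySem.List.pyGet? (rowOf i N) j).getD 0])
      [(PySem.List.pyGet? (rowOf i N) 0).getD 0]
    = rowOf (i + 1) m := by
  induction m with
  | zero => omega
  | succ m ih =>
    rcases Nat.eq_or_lt_of_le h1 with h | h
    · have hm0 : m = 0 := by omega
      subst hm0
      rw [show ((1:Nat):Int) = 1 by norm_num, PySem.List.pyRange_one_eq_nil (by norm_num)]
      rw [List.foldl_nil, rowOf_get_zero i N hN]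
      simp [rowOf, Nat.choose_self]
    · have h1m : 1 ≤ m := by omega
      have hcast : ((m + 1 : Nat) : Int) = (m : Int) + 1 := by push_cast; ring
      rw [hcast, PySem.List.pyRange_one_succ_right (by exact_mod_cast h1m),
          List.foldl_append, ih h1m (by omega)]
      simp only [List.foldl_cons, List.foldl_nil]
      have hc1 : ((m:Int) - 1) = ((m - 1 : Nat) : Int) := by omega
      rw [hc1, PySem.List.pyGet?_natCast, PySem.List.pyGet?_natCast]
      have e1 : (rowOf (i+1) m)[m-1]? = some ((((i+1) + (m-1) + 1).choose (i+1+1) : Int)) :=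
        rowOf_get (i+1) m (m-1) (by omega)
      have e2 : (rowOf i N)[m]? = some (((i + m + 1).choose (i + 1) : Int)) :=
        rowOf_get i N m (by omega)
      rw [e1, e2]
      simp only [Option.getD_some]
      have harg : (i+1) + (m-1) + 1 = i + m + 1 := by omega
      rw [harg]
      have pascal : (i + m + 2).choose (i + 2) = (i + m + 1).choose (i + 1) + (i + m + 1).choose (i + 2) := by
        have := Nat.choose_succ_succ (i + m + 1) (i + 1)
        simpa [Nat.add_assoc] using this
      rw [rowOf, rowOf, List.range_succ, List.map_append]
      congr 1
      simp only [List.map_cons, List.map_nil, List.cons.injEq, and_true]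
      have h2 : (i + 1) + m + 1 = i + m + 2 := by omega
      rw [h2, pascal]
      push_cast
      ring

-- A's outer fold builds the table of binomial rows
lemma outer_fold (N : Nat) (hN : 1 ≤ N) (K : Nat) :
    (PySem.List.pyRange 0 (K : Int) 1).foldl
      (fun house i =>
        house ++ [ (PySem.List.pyRange 1 (N : Int) 1).foldl
            (fun ps j => ps ++ [(PySem.List.pyGet? ps (j - 1)).getD 0 +
              (PySem.List.pyGet? ((PySem.List.pyGet? house i).getD []) j).getD 0])
            [(PySem.List.pyGet? ((PySem.List.pyGet? house i).getD []) 0).getD 0] ])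
      [rowOf 0 N]
    = (List.range (K + 1)).map (fun i => rowOf i N) := by
  induction K with
  | zero =>
    have h0 : PySem.List.pyRange 0 ((0:Nat):Int) 1 = [] :=
      PySem.List.pyRange_one_eq_nil (by norm_num)
    rw [h0]
    simp
  | succ K ih =>
    have hcast : ((K + 1 : Nat) : Int) = (K : Int) + 1 := by push_cast; ring
    rw [hcast, PySem.List.pyRange_one_succ_right (by positivity), List.foldl_append, ih]
    simp only [List.foldl_cons, List.foldl_nil]
    have hh : PySem.List.pyGet? ((List.range (K+1)).map (fun i => rowOf i N)) (K : Int)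
        = some (rowOf K N) := by
      rw [PySem.List.pyGet?_natCast]
      simp
    rw [hh]
    simp only [Option.getD_some]
    rw [inner_fold K N hN N hN (le_refl N)]
    rw [List.range_succ, List.map_append]
    simp [List.range_succ]

-- B's multiplicative fold computes the binomial coefficient (exact division at each step)
lemma alt_fold (N : Nat) (hN : 1 ≤ N) (m : Nat) :
    (PySem.List.pyRange 1 ((m : Int) + 1) 1).foldl
      (fun r t => PySem.Int.floordiv (r * ((N : Int) - 1 + t)) t) 1
    = ((N - 1 + m).choose m : Int) := by
  induction m with
  | zero =>
    have h0 : PySem.List.pyRange 1 (((0:Nat):Int) + 1) 1 = [] :=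
      PySem.List.pyRange_one_eq_nil (by norm_num)
    rw [h0]
    simp
  | succ m ih =>
    have hcast : ((m + 1 : Nat) : Int) + 1 = ((m : Int) + 1) + 1 := by push_cast; ring
    rw [hcast, PySem.List.pyRange_one_succ_right (by omega : (1:Int) ≤ (m:Int)+1), List.foldl_append, ih]
    simp only [List.foldl_cons, List.foldl_nil]
    have e1 : (N : Int) - 1 + ((m : Int) + 1) = ((N + m : Nat) : Int) := by push_cast; omega
    have e2 : ((m : Int) + 1) = ((m + 1 : Nat) : Int) := by push_cast; ring
    rw [e1, e2, ← Int.natCast_mul, PySem.Int.floordiv_natCast]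
    have key : (N - 1 + m).choose m * (N + m) = (N + m).choose (m + 1) * (m + 1) := by
      have h := Nat.add_one_mul_choose_eq (N - 1 + m) m
      have hNm : N - 1 + m + 1 = N + m := by omega
      calc (N - 1 + m).choose m * (N + m)
          = (N - 1 + m + 1) * (N - 1 + m).choose m := by rw [hNm]; ring
        _ = (N - 1 + m + 1).choose (m + 1) * (m + 1) := h
        _ = (N + m).choose (m + 1) * (m + 1) := by rw [hNm]
    rw [key, Nat.mul_div_cancel _ (by omega)]
    congr 2
    omega

lemma alt_eq (K N : Nat) (hN : 1 ≤ N) :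
    countPeoples_alt (K : Int) (N : Int) = ((N - 1 + (K + 1)).choose (K + 1) : Int) := by
  unfold countPeoples_alt
  have : (K : Int) + 2 = ((K + 1 : Nat) : Int) + 1 := by push_cast; ring
  rw [this, alt_fold N hN (K + 1)]

-- A's floor 0 is row 0 of the binomial table
lemma row0_eq (N : Nat) :
    (PySem.List.pyRange 0 (N : Int) 1).map (fun i => i + 1) = rowOf 0 N := by
  rw [PySem.List.pyRange_one, List.map_map, rowOf]
  have : ((N : Int) - 0).toNat = N := by omega
  rw [this]
  apply List.map_congr_left
  intro j hj
  simp [Nat.choose_one_right]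

lemma main_eq (k n : Int) (hk : 0 ≤ k) (hn : 1 ≤ n) :
    countPeoples k n = countPeoples_alt k n := by
  lift k to Nat using hk with K
  lift n to Nat using (by omega : (0:Int) ≤ n) with N
  have hN : 1 ≤ N := by exact_mod_cast hn
  unfold countPeoples
  simp only [row0_eq N]
  rw [outer_fold N hN K]
  have hh : PySem.List.pyGet? ((List.range (K+1)).map (fun i => rowOf i N)) (K : Int)
      = some (rowOf K N) := by
    rw [PySem.List.pyGet?_natCast]; simp
  rw [hh, Option.bind_some]
  have e2 : ((N : Int) - 1) = ((N - 1 : Nat) : Int) := by omega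
  rw [e2, PySem.List.pyGet?_natCast, rowOf_get K N (N-1) (by omega)]
  rw [alt_eq K N hN]
  simp only [Option.getD_some]
  congr 2
  omega

-- ===== VERDICT (by name: the statement is the Claim_ definition above) =====
theorem countPeoples_spec : Claim_equal_countPeoples := by
  intro k n _hd hpre
  unfold Spec_countPeoples
  exact main_eq k n hpre.1 hpre.2
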